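-- pv_equiv track=rewrite | github.com/my-temporary-name/gfg | Sorting_advance/video/7_sort_with_3_types.py | Sort_arr
-- ===== SOURCE A (Python) =====
-- def Sort_arr(arr):
--     temp = []
--     for x in arr:
--         if x==0:
--             temp.append(x)
--
--     for x in arr:
--         if x==1:
--             temp.append(x)
--
--     for x in arr:
--         if x==2:
--             temp.append(x)
--
--     arr[:]=temp
--     return arr
-- ===== SOURCE B (Python) =====
-- def Sort_arr(arr):
--     buckets = ([], [], [])
--     for x in arr:
--         if 0 <= x <= 2:
--             buckets[x].append(x)
--     arr[:] = buckets[0] + buckets[1] + buckets[2]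
--     return arr
-- ===== Notes on version B (the rewrite author's own statement) =====
-- stated objective: alternative
-- what changed: B makes a SINGLE pass over arr, distributing each element into one of three bucket lists indexed by its value (dropping non-{0,1,2} values exactly as A does), then concatenates the buckets, instead of A's three separate filtering scans of the whole list.
import Mathlib
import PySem

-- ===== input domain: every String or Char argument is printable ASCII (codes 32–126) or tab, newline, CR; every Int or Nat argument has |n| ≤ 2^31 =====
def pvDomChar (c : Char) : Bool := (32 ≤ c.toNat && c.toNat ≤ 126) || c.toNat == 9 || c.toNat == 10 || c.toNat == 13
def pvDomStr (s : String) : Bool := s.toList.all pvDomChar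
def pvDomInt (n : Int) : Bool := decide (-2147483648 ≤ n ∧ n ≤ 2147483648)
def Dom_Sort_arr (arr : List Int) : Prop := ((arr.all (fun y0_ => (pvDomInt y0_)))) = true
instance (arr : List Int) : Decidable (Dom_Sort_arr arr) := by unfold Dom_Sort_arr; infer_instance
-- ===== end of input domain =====

-- B replaces A's three filtering scans by ONE pass distributing elements into three buckets (alternative decomposition).
-- Both Pythons mutate arr in place via arr[:] = ...; the equivalence proved here is about the return value.

-- ===== PORT A =====
-- Three filtering passes appending to temp; arr[:] = temp; return arr.
def Sort_arr (arr : List Int) : List Int :=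
  let temp := arr.foldl (fun t x => if x == 0 then t ++ [x] else t) []
  let temp := arr.foldl (fun t x => if x == 1 then t ++ [x] else t) temp
  let temp := arr.foldl (fun t x => if x == 2 then t ++ [x] else t) temp
  temp

-- ===== PORT B =====
-- One pass: each x with 0 <= x <= 2 is appended to the bucket selected by its value; then concatenate.
def Sort_arr_alt (arr : List Int) : List Int :=
  let b := arr.foldl
    (fun (b : List Int × List Int × List Int) x =>
      if 0 ≤ x ∧ x ≤ 2 then
        -- buckets[x].append(x): select the bucket by the value of x
        if x = 0 then (b.1 ++ [x], b.2.1, b.2.2)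
        else if x = 1 then (b.1, b.2.1 ++ [x], b.2.2)
        else (b.1, b.2.1, b.2.2 ++ [x])
      else b)
    ([], [], [])
  b.1 ++ b.2.1 ++ b.2.2

-- ===== PRECONDITION & SPEC =====
def Spec_Sort_arr (arr : List Int) (out : List Int) : Prop := out = Sort_arr_alt arr
instance (arr : List Int) (out : List Int) : Decidable (Spec_Sort_arr arr out) := by unfold Spec_Sort_arr; infer_instance

-- ===== CLAIM (what is proved, stated in full; the proofs are below) =====
def Claim_equal_Sort_arr : Prop := ∀ (arr : List Int), Dom_Sort_arr arr → Spec_Sort_arr arr (Sort_arr arr)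

-- ===== LEMMAS AND PROOFS =====
-- A's filtering pass appends exactly the elements equal to c.
theorem pv_foldl_filter (c : Int) (arr : List Int) (t : List Int) :
    arr.foldl (fun t x => if x == c then t ++ [x] else t) t = t ++ arr.filter (· == c) := by
  induction arr generalizing t with
  | nil => simp
  | cons a as ih =>
    rw [List.foldl_cons, ih]
    by_cases h : a = c <;> simp [h]

-- B's single pass produces, in each bucket, the elements equal to that bucket's value.
theorem pv_buckets (arr : List Int) (b0 b1 b2 : List Int) :
    arr.foldl
      (fun (b : List Int × List Int × List Int) x =>
        if 0 ≤ x ∧ x ≤ 2 then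
          if x = 0 then (b.1 ++ [x], b.2.1, b.2.2)
          else if x = 1 then (b.1, b.2.1 ++ [x], b.2.2)
          else (b.1, b.2.1, b.2.2 ++ [x])
        else b)
      (b0, b1, b2)
    = (b0 ++ arr.filter (· == 0), b1 ++ arr.filter (· == 1), b2 ++ arr.filter (· == 2)) := by
  induction arr generalizing b0 b1 b2 with
  | nil => simp
  | cons a as ih =>
    rw [List.foldl_cons]
    by_cases h0 : a = 0
    · simp [h0, ih]
    · by_cases h1 : a = 1
      · simp [h1, ih]
      · by_cases h2 : a = 2
        · simp [h2, ih]
        · have hr : ¬ (0 ≤ a ∧ a ≤ 2) := by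
            rintro ⟨hl, hu⟩
            interval_cases a <;> simp_all
          simp [hr, h0, h1, h2, ih]

-- ===== VERDICT (by name: the statement is the Claim_ definition above) =====
theorem Sort_arr_spec : Claim_equal_Sort_arr := by
  intro arr _
  unfold Spec_Sort_arr Sort_arr Sort_arr_alt
  simp only [pv_foldl_filter, pv_buckets, List.nil_append, List.append_assoc]
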